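-- pv_equiv track=rewrite | github.com/Ryles1/AdventofCode | 2015/day8_2015.py | count_encoded_characters
-- ===== SOURCE A (Python) =====
-- def count_encoded_characters(s):
--     length = 2  # account for starting and ending "
--     i = 0
--     s = s.strip()
--     while i < len(s):
--         if s[i] == '"':
--             length += 2  # add \ before every "
--             i += 1
--         elif s[i] == '\\':
--             length += 2  # add \ before every \
--             i += 1
--         else:
--             length += 1
--             i += 1
--     return length
-- ===== SOURCE B (Python) =====
-- def count_encoded_characters(s):
--     s = s.strip()
--     return 2 + len(s) + s.count('"') + s.count('\\')
-- ===== Notes on version B (the rewrite author's own statement) =====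
-- stated objective: simpler
-- what changed: Replaces the per-character while loop with a closed form: 2 + len(stripped) + count of quotes + count of backslashes.
import Mathlib
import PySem

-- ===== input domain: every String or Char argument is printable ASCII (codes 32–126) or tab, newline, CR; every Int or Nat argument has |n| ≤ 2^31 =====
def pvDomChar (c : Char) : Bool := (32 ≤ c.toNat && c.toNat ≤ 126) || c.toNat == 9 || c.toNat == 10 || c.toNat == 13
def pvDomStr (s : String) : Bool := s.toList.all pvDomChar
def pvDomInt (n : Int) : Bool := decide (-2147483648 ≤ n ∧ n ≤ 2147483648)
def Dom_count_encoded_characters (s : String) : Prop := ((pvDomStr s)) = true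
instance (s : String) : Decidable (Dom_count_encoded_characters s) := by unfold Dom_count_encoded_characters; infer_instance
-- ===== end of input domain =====

-- B replaces A's per-character while loop with a closed-form count (simpler).

-- ===== PORT A =====
-- the while loop: i always advances by 1, so it is structural recursion on the remaining characters
def pvLoopA : List Char → Int → Int
  | [], length => length
  | c :: rest, length =>
    if c = '"' then pvLoopA rest (length + 2)
    else if c = '\\' then pvLoopA rest (length + 2)
    else pvLoopA rest (length + 1)

def count_encoded_characters (s : String) : Int :=
  pvLoopA (PySem.Str.strip s).toList 2

-- ===== PORT B =====
def count_encoded_characters_alt (s : String) : Int :=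
  let t := PySem.Str.strip s
  2 + PySem.Str.len t + (PySem.Str.count t "\"" : Int) + (PySem.Str.count t "\\" : Int)

-- ===== PRECONDITION & SPEC =====
def Spec_count_encoded_characters (s : String) (out : Int) : Prop := out = count_encoded_characters_alt s
instance (s : String) (out : Int) : Decidable (Spec_count_encoded_characters s out) := by unfold Spec_count_encoded_characters; infer_instance

-- ===== CLAIM (what is proved, stated in full; the proofs are below) =====
def Claim_equal_count_encoded_characters : Prop := ∀ (s : String), Dom_count_encoded_characters s → Spec_count_encoded_characters s (count_encoded_characters s)

-- ===== LEMMAS AND PROOFS =====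

-- str.count with a single-character needle is List.count
theorem pvGoSingleton (c : Char) : ∀ (l : List Char) (fuel acc : Nat), l.length ≤ fuel →
    PySem.Chars.count.go [c] fuel l acc = acc + l.count c := by
  intro l
  induction l with
  | nil => intro fuel acc h; cases fuel <;> simp [PySem.Chars.count.go]
  | cons x t ih =>
    intro fuel acc h
    cases fuel with
    | zero => simp at h
    | succ f =>
      rw [PySem.Chars.count.go]
      simp only [List.length_cons, Nat.succ_le_succ_iff] at h
      by_cases hx : x = c
      · subst hx
        simp [List.isPrefixOf, ih f (acc + 1) h]
        omega
      · simp [List.isPrefixOf, hx, ih f acc h, Ne.symm hx]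

theorem pvCountSingleton (c : Char) (l : List Char) :
    PySem.Chars.count l [c] = l.count c := by
  simp [PySem.Chars.count, pvGoSingleton c l l.length 0 le_rfl]

theorem pvLoopA_eq (l : List Char) : ∀ (acc : Int),
    pvLoopA l acc = acc + l.length + (l.count '"' : Int) + (l.count '\\' : Int) := by
  induction l with
  | nil => intro acc; simp [pvLoopA]
  | cons c rest ih =>
    intro acc
    by_cases h1 : c = '"'
    · subst h1; simp [pvLoopA, ih]; ring
    · by_cases h2 : c = '\\'
      · subst h2; simp [pvLoopA, h1, ih]; ring
      · simp [pvLoopA, h1, h2, ih]; ring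

-- ===== VERDICT (by name: the statement is the Claim_ definition above) =====
theorem count_encoded_characters_spec : Claim_equal_count_encoded_characters := by
  intro s _
  unfold Spec_count_encoded_characters count_encoded_characters count_encoded_characters_alt
  simp only [PySem.Str.count, PySem.Str.len_eq]
  rw [pvLoopA_eq]
  have h1 : ("\"" : String).toList = ['"'] := rfl
  have h2 : ("\\" : String).toList = ['\\'] := rfl
  rw [h1, h2, pvCountSingleton, pvCountSingleton]
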